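-- pv_equiv track=rewrite | github.com/ZoltanMG/fotografia-zoltan-mg | src/kommit.py | diagonal_superior_izquierda
-- ===== SOURCE A (Python) =====
-- def diagonal_superior_izquierda(dimenciones, x, y):
--     total = 0
--     new_dimencion_x = x
--     new_dimencion_y = y
--     new_x = 1
--     new_y = 1
--
--     for fila in range(1, new_dimencion_y):
--         cont = 1
--         for columna in range(1, new_dimencion_x):
--             if cont == fila:
--                 total +=1
--             cont += 1
--     return total
-- ===== SOURCE B (Python) =====
-- def diagonal_superior_izquierda(dimenciones, x, y):
--     return max(0, min(x - 1, y - 1))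
-- ===== Notes on version B (the rewrite author's own statement) =====
-- stated objective: faster
-- what changed: Replaced the nested counting loops by the closed form max(0, min(x-1, y-1)).
import Mathlib
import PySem

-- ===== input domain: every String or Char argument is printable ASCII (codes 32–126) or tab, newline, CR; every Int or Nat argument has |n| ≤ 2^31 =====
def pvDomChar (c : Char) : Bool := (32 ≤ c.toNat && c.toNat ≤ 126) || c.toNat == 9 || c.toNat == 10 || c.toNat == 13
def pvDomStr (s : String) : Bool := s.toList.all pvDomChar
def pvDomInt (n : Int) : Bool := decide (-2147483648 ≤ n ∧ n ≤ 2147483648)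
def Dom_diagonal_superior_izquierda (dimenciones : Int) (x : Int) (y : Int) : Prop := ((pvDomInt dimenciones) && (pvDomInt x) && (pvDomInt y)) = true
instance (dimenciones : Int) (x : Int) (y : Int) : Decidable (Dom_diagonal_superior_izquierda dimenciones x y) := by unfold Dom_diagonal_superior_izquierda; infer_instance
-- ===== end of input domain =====

-- ===== PORT A =====
-- literal transliteration of A: nested folds over range(1,y) / range(1,x),
-- inner state (total, cont)
def diagonal_superior_izquierda (dimenciones : Int) (x : Int) (y : Int) : Int :=
  (PySem.List.pyRange 1 y 1).foldl
    (fun total fila =>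
      ((PySem.List.pyRange 1 x 1).foldl
        (fun (s : Int × Int) _columna =>
          (if s.2 == fila then s.1 + 1 else s.1, s.2 + 1))
        (total, 1)).1)
    0

-- ===== PORT B =====
-- B: closed form max(0, min(x-1, y-1))
def diagonal_superior_izquierda_alt (dimenciones : Int) (x : Int) (y : Int) : Int :=
  max 0 (min (x - 1) (y - 1))

-- ===== PRECONDITION & SPEC =====
def Spec_diagonal_superior_izquierda (dimenciones : Int) (x : Int) (y : Int) (out : Int) : Prop := out = diagonal_superior_izquierda_alt dimenciones x y
instance (dimenciones : Int) (x : Int) (y : Int) (out : Int) : Decidable (Spec_diagonal_superior_izquierda dimenciones x y out) := by unfold Spec_diagonal_superior_izquierda; infer_instance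

-- ===== CLAIM (what is proved, stated in full; the proofs are below) =====
def Claim_equal_diagonal_superior_izquierda : Prop := ∀ (dimenciones : Int) (x : Int) (y : Int), Dom_diagonal_superior_izquierda dimenciones x y → Spec_diagonal_superior_izquierda dimenciones x y (diagonal_superior_izquierda dimenciones x y)

-- ===== LEMMAS AND PROOFS =====

-- ===== VERDICT (by name: the statement is the Claim_ definition above) =====
-- inner loop: cont starts at c and mirrors the iteration count, so the loop adds 1
-- exactly when fila lies in [c, c + len)
theorem pv_inner (fila : Int) (l : List Int) : ∀ (t c : Int),
    (l.foldl (fun (s : Int × Int) _ =>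
      (if s.2 == fila then s.1 + 1 else s.1, s.2 + 1)) (t, c)).1
    = t + (if c ≤ fila ∧ fila < c + l.length then 1 else 0) := by
  induction l with
  | nil => intro t c; simp
  | cons a l ih =>
    intro t c
    simp only [List.foldl_cons, List.length_cons, ih]
    by_cases h : c = fila <;> simp [h] <;> split_ifs <;> push_cast at * <;> omega

theorem pv_outer (x : Int) (n : Nat) : ∀ (t : Int),
    (PySem.List.pyRange 1 (1 + (n : Int)) 1).foldl
      (fun total fila =>
        ((PySem.List.pyRange 1 x 1).foldl
          (fun (s : Int × Int) _columna =>
            (if s.2 == fila then s.1 + 1 else s.1, s.2 + 1))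
          (total, 1)).1)
      t
    = t + max 0 (min (x - 1) (n : Int)) := by
  induction n with
  | zero => intro t; simp [PySem.List.pyRange_one_eq_nil]
  | succ n ih =>
    intro t
    have h : (1 : Int) ≤ 1 + (n : Int) := by omega
    have hs : (1 : Int) + ((n + 1 : Nat) : Int) = (1 + (n : Int)) + 1 := by push_cast; ring
    rw [hs, PySem.List.pyRange_one_succ_right h, List.foldl_append, ih]
    simp only [List.foldl_cons, List.foldl_nil]
    rw [pv_inner]
    simp only [PySem.List.length_pyRange_one]
    split_ifs with hc
    · rcases hc with ⟨h1, h2⟩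
      have : (1 : Int) + ((x - 1).toNat : Int) = x := by omega
      push_cast
      omega
    · push_cast at hc ⊢
      omega

theorem diagonal_superior_izquierda_spec : Claim_equal_diagonal_superior_izquierda := by
  intro d x y _
  unfold Spec_diagonal_superior_izquierda diagonal_superior_izquierda diagonal_superior_izquierda_alt
  by_cases hy : y ≤ 1
  · rw [PySem.List.pyRange_one_eq_nil hy]
    simp; omega
  · have hn : y = 1 + ((y - 1).toNat : Int) := by omega
    rw [hn, pv_outer]
    omega
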